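-- pv_equiv track=rewrite | github.com/ZIYU-DEEP/Deep-Learning-Template-PyTorch | helper/utils.py | get_saved_epoch_list
-- ===== SOURCE A (Python) =====
-- def get_saved_epoch_list(n_epoch):
--     """
--     This is a silly function.
--     Just to get a list of epoch id list.
--     This will be used in experiments to decide which to load.
--     """
--
--     def get_saved_epoch(epoch):
--         if epoch <= 50:
--             return epoch
--
--         elif epoch <= 100 and not epoch % 5:
--             return epoch
--
--         elif epoch <= 200 and not epoch % 10:
--             return epoch
--
--         elif epoch <= 500 and not epoch % 30:
--             return epoch
--
--         elif epoch <= 2000 and not epoch % 50: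
--             return epoch
--
--         elif epoch <= 5000 and not epoch % 80:
--             return epoch
--
--         return None
--
--     # Add the saved epochs to the list
--     saved_epoch_list = []
--     for epoch in range(n_epoch):
--         if get_saved_epoch(epoch) is not None:
--             saved_epoch_list.append(get_saved_epoch(epoch))
--
--     # Make sure you do not miss the last epoch
--     if n_epoch not in saved_epoch_list:
--         saved_epoch_list.append(n_epoch)
--
--     return saved_epoch_list
-- ===== SOURCE B (Python) =====
-- def get_saved_epoch_list(n_epoch):
--     # Constant-size candidate table: the tiered modulo rules admit only epochs <= 5000,
--     # enumerated directly as stepped ranges; clip below n_epoch and append the final epoch.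
--     candidates = set(
--         list(range(0, 51))          # every epoch <= 50
--         + list(range(55, 101, 5))   # 51..100, multiples of 5
--         + list(range(110, 201, 10)) # 101..200, multiples of 10
--         + list(range(210, 501, 30)) # 201..500, multiples of 30
--         + list(range(250, 2001, 50))# 201..2000, multiples of 50
--         + list(range(240, 5001, 80))# 201..5000, multiples of 80
--     )
--     return sorted(e for e in candidates if e < n_epoch) + [n_epoch]
-- ===== Notes on version B (the rewrite author's own statement) =====
-- stated objective: faster
-- what changed: Instead of testing every epoch in range(n_epoch) against the tiered modulo rules, B enumerates the fixed finite candidate set (epochs <= 5000 admitted by the rules) as stepped ranges once, keeps those below n_epoch sorted, and appends n_epoch.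
import Mathlib
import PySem

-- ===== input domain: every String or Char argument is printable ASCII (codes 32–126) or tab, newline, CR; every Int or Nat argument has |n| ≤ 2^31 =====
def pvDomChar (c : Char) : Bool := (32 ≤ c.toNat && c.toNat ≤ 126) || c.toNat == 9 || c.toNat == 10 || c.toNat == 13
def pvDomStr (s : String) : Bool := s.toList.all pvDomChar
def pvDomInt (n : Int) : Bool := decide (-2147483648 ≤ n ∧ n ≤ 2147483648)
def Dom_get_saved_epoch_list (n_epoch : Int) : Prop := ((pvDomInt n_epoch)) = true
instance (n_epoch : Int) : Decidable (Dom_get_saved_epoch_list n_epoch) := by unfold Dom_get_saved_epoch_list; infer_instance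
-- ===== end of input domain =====

-- B replaces the O(n_epoch) scan by a constant-size table of the epochs the tiered
-- modulo rules can ever admit (all ≤ 5000), filtered below n_epoch; objective: faster (asymptotic).

-- ===== PORT A =====
def pvGetSavedEpoch (epoch : Int) : Option Int :=
  if epoch ≤ 50 then some epoch
  else if epoch ≤ 100 ∧ PySem.Int.mod epoch 5 = 0 then some epoch
  else if epoch ≤ 200 ∧ PySem.Int.mod epoch 10 = 0 then some epoch
  else if epoch ≤ 500 ∧ PySem.Int.mod epoch 30 = 0 then some epoch
  else if epoch ≤ 2000 ∧ PySem.Int.mod epoch 50 = 0 then some epoch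
  else if epoch ≤ 5000 ∧ PySem.Int.mod epoch 80 = 0 then some epoch
  else none

def get_saved_epoch_list (n_epoch : Int) : List Int :=
  let saved_epoch_list :=
    (PySem.List.pyRange 0 n_epoch 1).foldl
      (fun acc epoch =>
        match pvGetSavedEpoch epoch with
        | some v => acc ++ [v]
        | none => acc) []
  if saved_epoch_list.contains n_epoch then saved_epoch_list
  else saved_epoch_list ++ [n_epoch]

-- ===== PORT B =====
def pvCands : PySem.Set Int :=
  PySem.Set.ofList
    (PySem.List.pyRange 0 51 1 ++ PySem.List.pyRange 55 101 5 ++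
     PySem.List.pyRange 110 201 10 ++ PySem.List.pyRange 210 501 30 ++
     PySem.List.pyRange 250 2001 50 ++ PySem.List.pyRange 240 5001 80)

def get_saved_epoch_list_alt (n_epoch : Int) : List Int :=
  PySem.List.sorted (pvCands.filter (fun e => decide (e < n_epoch))) (fun x => x) false
    ++ [n_epoch]

-- ===== PRECONDITION & SPEC =====
def Spec_get_saved_epoch_list (n_epoch : Int) (out : List Int) : Prop := out = get_saved_epoch_list_alt n_epoch
instance (n_epoch : Int) (out : List Int) : Decidable (Spec_get_saved_epoch_list n_epoch out) := by unfold Spec_get_saved_epoch_list; infer_instance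

-- ===== CLAIM (what is proved, stated in full; the proofs are below) =====
def Claim_equal_get_saved_epoch_list : Prop := ∀ (n_epoch : Int), Dom_get_saved_epoch_list n_epoch → Spec_get_saved_epoch_list n_epoch (get_saved_epoch_list n_epoch)

-- ===== LEMMAS AND PROOFS =====

-- the boolean test behind A's filter
def pvKeep (e : Int) : Bool := (pvGetSavedEpoch e).isSome

theorem pvGSE_cases (e : Int) : pvGetSavedEpoch e = none ∨ pvGetSavedEpoch e = some e := by
  unfold pvGetSavedEpoch; split_ifs <;> simp

theorem pvKeep_false_of_big (e : Int) (h : 5001 ≤ e) : pvKeep e = false := by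
  unfold pvKeep pvGetSavedEpoch
  split_ifs with h1 h2 h3 h4 h5 h6 <;> first | rfl | omega

theorem pvFold_eq_filter (n : Int) :
    (PySem.List.pyRange 0 n 1).foldl
      (fun acc epoch =>
        match pvGetSavedEpoch epoch with
        | some v => acc ++ [v]
        | none => acc) []
    = (PySem.List.pyRange 0 n 1).filter pvKeep := by
  have hf : (fun (acc : List Int) (epoch : Int) =>
        match pvGetSavedEpoch epoch with
        | some v => acc ++ [v]
        | none => acc)
      = (fun acc e => if pvKeep e then acc ++ [e] else acc) := by
    funext acc e
    rcases pvGSE_cases e with h | h <;> simp [h, pvKeep]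
  rw [hf, PySem.List.foldl_append_if_eq_filter]
  simp

theorem pvKeep_iff (a : Int) : pvKeep a = true ↔
    (a ≤ 50 ∨ (a ≤ 100 ∧ (5:Int) ∣ a) ∨ (a ≤ 200 ∧ (10:Int) ∣ a) ∨ (a ≤ 500 ∧ (30:Int) ∣ a) ∨
     (a ≤ 2000 ∧ (50:Int) ∣ a) ∨ (a ≤ 5000 ∧ (80:Int) ∣ a)) := by
  unfold pvKeep pvGetSavedEpoch
  simp only [PySem.Int.mod_eq_zero_iff_dvd]
  split_ifs <;> simp_all

theorem pvMem_cands (a : Int) : a ∈ pvCands ↔ (0 ≤ a ∧ pvKeep a = true) := by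
  unfold pvCands
  rw [PySem.Set.mem_ofList]
  simp only [List.mem_append, PySem.List.mem_pyRange_one,
    PySem.List.mem_pyRange_iff_of_pos (by norm_num : (0:Int) < 5),
    PySem.List.mem_pyRange_iff_of_pos (by norm_num : (0:Int) < 10),
    PySem.List.mem_pyRange_iff_of_pos (by norm_num : (0:Int) < 30),
    PySem.List.mem_pyRange_iff_of_pos (by norm_num : (0:Int) < 50),
    PySem.List.mem_pyRange_iff_of_pos (by norm_num : (0:Int) < 80),
    pvKeep_iff]
  omega

theorem pvCands_nodup : pvCands.Nodup := by
  unfold pvCands; exact PySem.Set.nodup_ofList _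

theorem pvPerm : ((PySem.List.pyRange 0 5001 1).filter pvKeep).Perm pvCands := by
  rw [List.perm_ext_iff_of_nodup
    (List.Nodup.filter _ (PySem.List.nodup_pyRange_one 0 5001)) pvCands_nodup]
  intro a
  simp only [List.mem_filter, PySem.List.mem_pyRange_one, pvMem_cands, pvKeep_iff]
  omega

theorem pvFilter_range_eq (n : Int) :
    (PySem.List.pyRange 0 n 1).filter pvKeep
      = ((PySem.List.pyRange 0 5001 1).filter pvKeep).filter (fun e => decide (e < n)) := by
  rcases (by omega : n ≤ 0 ∨ 0 < n) with hn | hn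
  · rw [PySem.List.pyRange_one_eq_nil (by omega)]
    symm
    simp only [List.filter_nil]
    rw [List.filter_eq_nil_iff]
    intro e he
    have := List.of_mem_filter he
    have hmem := List.mem_of_mem_filter he
    have := (PySem.List.mem_pyRange_one).1 hmem
    simp only [decide_eq_true_eq]
    omega
  · rcases (by omega : n ≤ 5001 ∨ 5001 < n) with h5 | h5
    · rw [PySem.List.pyRange_one_append 0 n 5001 (by omega) h5, List.filter_append,
        List.filter_append]
      have h1 : ((PySem.List.pyRange 0 n 1).filter pvKeep).filter (fun e => decide (e < n))
          = (PySem.List.pyRange 0 n 1).filter pvKeep := by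
        rw [List.filter_eq_self]
        intro e he
        have := (PySem.List.mem_pyRange_one).1 (List.mem_of_mem_filter he)
        simp only [decide_eq_true_eq]; omega
      have h2 : ((PySem.List.pyRange n 5001 1).filter pvKeep).filter (fun e => decide (e < n))
          = [] := by
        rw [List.filter_eq_nil_iff]
        intro e he
        have := (PySem.List.mem_pyRange_one).1 (List.mem_of_mem_filter he)
        simp only [decide_eq_true_eq]; omega
      rw [h1, h2, List.append_nil]
    · rw [PySem.List.pyRange_one_append 0 5001 n (by omega) (by omega), List.filter_append]
      have h1 : (PySem.List.pyRange 5001 n 1).filter pvKeep = [] := by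
        rw [List.filter_eq_nil_iff]
        intro e he
        have := (PySem.List.mem_pyRange_one).1 he
        have := pvKeep_false_of_big e (by omega)
        simp_all
      have h2 : ((PySem.List.pyRange 0 5001 1).filter pvKeep).filter (fun e => decide (e < n))
          = (PySem.List.pyRange 0 5001 1).filter pvKeep := by
        rw [List.filter_eq_self]
        intro e he
        have := (PySem.List.mem_pyRange_one).1 (List.mem_of_mem_filter he)
        simp only [decide_eq_true_eq]; omega
      rw [h1, h2, List.append_nil]

set_option maxRecDepth 100000 in
theorem pvSorted_eq (n : Int) :
    PySem.List.sorted (pvCands.filter (fun e => decide (e < n))) (fun x => x) false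
      = (PySem.List.pyRange 0 n 1).filter pvKeep := by
  rw [pvFilter_range_eq n]
  apply PySem.List.sorted_eq_of_perm_of_pairwise_lt
  · exact pvPerm.filter _
  · exact ((PySem.List.pairwise_lt_pyRange_one 0 5001).filter _).filter _

theorem pvNotMem (n : Int) : ((PySem.List.pyRange 0 n 1).filter pvKeep).contains n = false := by
  simp only [List.contains_eq_mem, decide_eq_false_iff_not]
  intro h
  have := (PySem.List.mem_pyRange_one).1 (List.mem_of_mem_filter h)
  omega

-- ===== VERDICT (by name: the statement is the Claim_ definition above) =====
theorem get_saved_epoch_list_spec : Claim_equal_get_saved_epoch_list := by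
  intro n _
  unfold Spec_get_saved_epoch_list get_saved_epoch_list get_saved_epoch_list_alt
  simp only [pvFold_eq_filter, pvSorted_eq, pvNotMem n, Bool.false_eq_true, if_false]
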